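-- pv_equiv track=rewrite | github.com/vaish-poldasu/deductive-fault-simulation | gatesdefine.py | ded_xor
-- ===== SOURCE A (Python) =====
-- def ded_xor(state_ip, ip_FL, op):
--     op_FL = set.union(*(set(fault_set) for fault_set in ip_FL))
--     if sum(state_ip) % 2 == 0:
--         op_FL.add(f"{op}/1")
--     else:
--         op_FL.add(f"{op}/0")
--
--     s1_fault = [fault for i, state in enumerate(state_ip) if state == 1 for fault in ip_FL[i]]
--     s0_fault = [fault for i, state in enumerate(state_ip) if state == 0 for fault in ip_FL[i]]
--
--     s1_fc = {fault: s1_fault.count(fault) for fault in set(s1_fault)}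
--     s0_fc = {fault: s0_fault.count(fault) for fault in set(s0_fault)}
--
--     op_FL = rm_f(op_FL, s1_fc)
--     op_FL = rm_f(op_FL, s0_fc)
--
--     return op_FL
--
-- def rm_f(op_FL, fault_counts):
--     for fault, count in fault_counts.items():
--         if count % 2 == 0:
--             op_FL.discard(fault)
--     return op_FL
-- ===== SOURCE B (Python) =====
-- def ded_xor(state_ip, ip_FL, op):
--     op_FL = set.union(*(set(fault_set) for fault_set in ip_FL))
--     if sum(state_ip) % 2 == 0:
--         op_FL.add(f"{op}/1")
--     else:
--         op_FL.add(f"{op}/0")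
--
--     def keep(f):
--         c1 = c0 = 0
--         for s, faults in zip(state_ip, ip_FL):
--             k = faults.count(f)
--             if s == 1:
--                 c1 += k
--             elif s == 0:
--                 c0 += k
--         return not ((c1 > 0 and c1 % 2 == 0) or (c0 > 0 and c0 % 2 == 0))
--
--     return {f for f in op_FL if keep(f)}
-- ===== Notes on version B (the rewrite author's own statement) =====
-- stated objective: simpler
-- what changed: A materialises s1/s0 occurrence lists, rebuilds two count dictionaries with list.count, and runs two mutating removal passes over their items; B builds no intermediate collections at all: for each candidate fault it scans zip(state_ip, ip_FL) once tallying its occurrences in the 1-group and 0-group and keeps it unless either tally is positive and even.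
import Mathlib
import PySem

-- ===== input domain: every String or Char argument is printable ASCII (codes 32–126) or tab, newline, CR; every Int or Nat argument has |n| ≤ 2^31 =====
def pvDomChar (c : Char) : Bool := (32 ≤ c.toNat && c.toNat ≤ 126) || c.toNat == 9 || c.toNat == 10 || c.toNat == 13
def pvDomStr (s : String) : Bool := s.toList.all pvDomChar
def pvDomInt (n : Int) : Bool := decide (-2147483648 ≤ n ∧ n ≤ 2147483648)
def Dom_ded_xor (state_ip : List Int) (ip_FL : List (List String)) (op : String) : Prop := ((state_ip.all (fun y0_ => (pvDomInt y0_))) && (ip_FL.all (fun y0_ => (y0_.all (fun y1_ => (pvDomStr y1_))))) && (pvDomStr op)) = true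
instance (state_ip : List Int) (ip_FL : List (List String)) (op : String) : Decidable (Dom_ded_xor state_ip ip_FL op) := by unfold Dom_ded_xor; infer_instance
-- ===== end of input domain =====

-- B replaces A's occurrence lists, count dictionaries and two mutating removal passes by a
-- direct per-candidate scan of zip(state_ip, ip_FL) with two running tallies (simpler, no dicts).

-- ===== PORT A =====
-- helper rm_f of A: discard every fault whose count is even
def pv_rm_f (op_FL : PySem.Set String) (fault_counts : PySem.Dict String Int) : PySem.Set String :=
  fault_counts.items.foldl
    (fun s p => if PySem.Int.mod p.2 2 == 0 then PySem.Set.discard s p.1 else s) op_FL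

def ded_xor (state_ip : List Int) (ip_FL : List (List String)) (op : String) : List String :=
  match ip_FL with
  | [] => []   -- Python: set.union(*()) raises TypeError here; excluded by Pre_ded_xor
  | fs :: rest =>
    let op_FL0 : PySem.Set String :=
      rest.foldl (fun s l => PySem.Set.union s (PySem.Set.ofList l)) (PySem.Set.ofList fs)
    let op_FL1 : PySem.Set String :=
      if PySem.Int.mod state_ip.sum 2 == 0 then PySem.Set.add op_FL0 (op ++ "/1")
      else PySem.Set.add op_FL0 (op ++ "/0")
    -- ip_FL[i]: Python raises IndexError out of range (excluded by Pre_); default [] is never used inside Pre_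
    let s1_fault : List String :=
      ((PySem.List.enumerate state_ip).filter (fun p => p.2 == 1)).flatMap
        (fun p => PySem.List.pyGetD ip_FL p.1 [])
    let s0_fault : List String :=
      ((PySem.List.enumerate state_ip).filter (fun p => p.2 == 0)).flatMap
        (fun p => PySem.List.pyGetD ip_FL p.1 [])
    let s1_fc : PySem.Dict String Int :=
      (PySem.Set.ofList s1_fault).foldl
        (fun d f => d.insert f ((s1_fault.count f : Int))) PySem.Dict.empty
    let s0_fc : PySem.Dict String Int :=
      (PySem.Set.ofList s0_fault).foldl
        (fun d f => d.insert f ((s0_fault.count f : Int))) PySem.Dict.empty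
    pv_rm_f (pv_rm_f op_FL1 s1_fc) s0_fc

-- ===== PORT B =====
-- helper: B's 'keep' — one scan over zip(state_ip, ip_FL) tallying f's occurrences per group
def pvKeep (state_ip : List Int) (ip_FL : List (List String)) (f : String) : Bool :=
  let c : Int × Int :=
    (state_ip.zip ip_FL).foldl
      (fun c e =>
        let k : Int := e.2.count f
        if e.1 == 1 then (c.1 + k, c.2)
        else if e.1 == 0 then (c.1, c.2 + k)
        else c)
      (0, 0)
  !((decide (0 < c.1) && (PySem.Int.mod c.1 2 == 0)) ||
    (decide (0 < c.2) && (PySem.Int.mod c.2 2 == 0)))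

def ded_xor_alt (state_ip : List Int) (ip_FL : List (List String)) (op : String) : List String :=
  match ip_FL with
  | [] => []   -- B keeps set.union(*()) verbatim: same TypeError, excluded by Pre_ded_xor
  | fs :: rest =>
    let op_FL0 : PySem.Set String :=
      rest.foldl (fun s l => PySem.Set.union s (PySem.Set.ofList l)) (PySem.Set.ofList fs)
    let op_FL : PySem.Set String :=
      if PySem.Int.mod state_ip.sum 2 == 0 then PySem.Set.add op_FL0 (op ++ "/1")
      else PySem.Set.add op_FL0 (op ++ "/0")
    op_FL.filter (fun f => pvKeep state_ip ip_FL f)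

-- ===== PRECONDITION & SPEC =====
-- Pre_ excludes exactly the inputs where A raises: empty ip_FL (TypeError from set.union(*())),
-- and any input whose state is 0 or 1 at an index past the end of ip_FL (IndexError from ip_FL[i]).
def Pre_ded_xor (state_ip : List Int) (ip_FL : List (List String)) (op : String) : Prop :=
  ip_FL ≠ [] ∧ ∀ i : Nat, i < state_ip.length →
    (state_ip.getD i 0 = 0 ∨ state_ip.getD i 0 = 1) → i < ip_FL.length
instance (state_ip : List Int) (ip_FL : List (List String)) (op : String) : Decidable (Pre_ded_xor state_ip ip_FL op) := by unfold Pre_ded_xor; infer_instance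
def pvWitness_ded_xor : List Int × List (List String) × String := ([1, 0], [["a/0"], ["b/1", "a/0"]], "z")

def Spec_ded_xor (state_ip : List Int) (ip_FL : List (List String)) (op : String) (out : List String) : Prop := out = ded_xor_alt state_ip ip_FL op
instance (state_ip : List Int) (ip_FL : List (List String)) (op : String) (out : List String) : Decidable (Spec_ded_xor state_ip ip_FL op out) := by unfold Spec_ded_xor; infer_instance

-- ===== CLAIM (what is proved, stated in full; the proofs are below) =====
def Claim_equal_ded_xor : Prop := ∀ (state_ip : List Int) (ip_FL : List (List String)) (op : String), Dom_ded_xor state_ip ip_FL op → Pre_ded_xor state_ip ip_FL op → Spec_ded_xor state_ip ip_FL op (ded_xor state_ip ip_FL op)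

-- ===== LEMMAS AND PROOFS =====

-- enumerate from s+1 is enumerate from s with indices shifted
theorem pv_enumerate_shift (t : List Int) (s : Int) :
    PySem.List.enumerate t (s + 1) = (PySem.List.enumerate t s).map (fun p => (p.1 + 1, p.2)) := by
  induction t generalizing s with
  | nil => simp [PySem.List.enumerate]
  | cons x t ih => simp [PySem.List.enumerate, ih]

theorem pv_enumerate_le (t : List Int) (s : Int) :
    ∀ p ∈ PySem.List.enumerate t s, s ≤ p.1 := by
  induction t generalizing s with
  | nil => simp [PySem.List.enumerate]
  | cons x t ih =>
    intro p hp
    simp only [PySem.List.enumerate, List.mem_cons] at hp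
    rcases hp with rfl | hp
    · simp
    · have := ih (s + 1) p hp; omega

theorem pv_pyGetD_nil {α : Type} (i : Int) (d : α) : PySem.List.pyGetD ([] : List α) i d = d := by
  simp [PySem.List.pyGetD, PySem.List.pyGet?, PySem.List.pyIdx?]

theorem pv_pyGetD_cons_succ {α : Type} (a : α) (xs : List α) (i : Int) (hi : 0 ≤ i) (d : α) :
    PySem.List.pyGetD (a :: xs) (i + 1) d = PySem.List.pyGetD xs i d := by
  obtain ⟨n, rfl⟩ := Int.eq_ofNat_of_zero_le hi
  have h1 : ((n : Int) + 1) = ((n + 1 : Nat) : Int) := by push_cast; ring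
  rw [h1, PySem.List.pyGetD_natCast, PySem.List.pyGetD_natCast]
  simp

-- A's s1/s0 comprehension equals the zip-based traversal of B (out-of-range indices contribute [])
theorem pv_enum_eq_zip (b : Int) :
    ∀ (state : List Int) (L : List (List String)),
    ((PySem.List.enumerate state).filter (fun p => p.2 == b)).flatMap
        (fun p => PySem.List.pyGetD L p.1 [])
      = ((state.zip L).filter (fun e => e.1 == b)).flatMap (fun e => e.2) := by
  intro state
  induction state with
  | nil => intro L; simp [PySem.List.enumerate]
  | cons x t ih =>
    intro L
    have hshift : PySem.List.enumerate (x :: t) 0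
        = (0, x) :: (PySem.List.enumerate t 0).map (fun p => (p.1 + 1, p.2)) := by
      have := pv_enumerate_shift t 0
      simp [PySem.List.enumerate]
      simpa using this
    rw [hshift]
    cases L with
    | nil =>
      simp only [List.zip_nil_right, List.filter_nil, List.flatMap_nil]
      apply List.flatMap_eq_nil_iff.mpr
      intro p _
      exact pv_pyGetD_nil p.1 []
    | cons l Lt =>
      have hmapped :
          ((PySem.List.enumerate t 0).map (fun p => ((p.1 + 1 : Int), p.2))).filter
              (fun p => p.2 == b)
            = ((PySem.List.enumerate t 0).filter (fun p => p.2 == b)).map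
                (fun p => ((p.1 + 1 : Int), p.2)) := by
        rw [List.filter_map]
        rfl
      have hcongr :
          (((PySem.List.enumerate t 0).filter (fun p => p.2 == b)).map
              (fun p => ((p.1 + 1 : Int), p.2))).flatMap (fun p => PySem.List.pyGetD (l :: Lt) p.1 [])
            = ((PySem.List.enumerate t 0).filter (fun p => p.2 == b)).flatMap
                (fun p => PySem.List.pyGetD Lt p.1 []) := by
        rw [List.flatMap_map]
        apply List.flatMap_congr
        intro p hp
        have hp' : p ∈ PySem.List.enumerate t 0 := List.mem_of_mem_filter hp
        exact pv_pyGetD_cons_succ l Lt p.1 (pv_enumerate_le t 0 p hp') []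
      have hhead : PySem.List.pyGetD (l :: Lt) (0 : Int) ([] : List String) = l := by
        have h0 : (0 : Int) = ((0 : Nat) : Int) := rfl
        rw [h0, PySem.List.pyGetD_natCast]
        rfl
      by_cases hx : x == b
      · simp only [List.filter_cons, List.zip_cons_cons, hx, if_pos, List.flatMap_cons]
        rw [hmapped, hcongr, ih Lt, hhead]
      · simp only [List.filter_cons, List.zip_cons_cons, hx, Bool.false_eq_true, if_false]
        rw [hmapped, hcongr, ih Lt]

-- A's rm_f loop is a filter by "no even-count entry for this fault"
theorem pv_rm_eq_filter :
    ∀ (l : List (String × Int)) (s : List String),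
    l.foldl (fun s p => if PySem.Int.mod p.2 2 == 0 then PySem.Set.discard s p.1 else s) s
      = s.filter (fun f => !(l.any (fun p => p.1 == f && (PySem.Int.mod p.2 2 == 0)))) := by
  intro l
  induction l with
  | nil => intro s; simp
  | cons p l ih =>
    intro s
    by_cases he : PySem.Int.mod p.2 2 == 0
    · simp only [List.foldl_cons, he, if_pos]
      rw [ih]
      simp only [PySem.Set.discard]
      rw [List.filter_filter]
      apply List.filter_congr
      intro f _
      by_cases hf : p.1 = f
      · rw [show (f == p.1) = true by simp [hf], List.any_cons,
          show (p.1 == f) = true by simp [hf], he]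
        simp only [Bool.not_true, Bool.and_false, Bool.false_and, Bool.true_and, Bool.and_true,
          Bool.true_or, Bool.or_true]
      · rw [show (f == p.1) = false by simp [Ne.symm hf], List.any_cons,
          show (p.1 == f) = false by simp [hf]]
        simp only [Bool.not_false, Bool.and_true, Bool.false_and, Bool.false_or]
    · have he' : (PySem.Int.mod p.2 2 == 0) = false := by simpa using he
      simp only [List.foldl_cons, he', Bool.false_eq_true, if_false]
      rw [ih]
      apply List.filter_congr
      intro f _
      simp only [List.any_cons, he', Bool.and_false, Bool.false_or]

-- A's count dict: items are (fault, count) over the distinct faults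
theorem pv_fc_items (sF : List String) :
    ((PySem.Set.ofList sF).foldl
        (fun d f => d.insert f ((sF.count f : Int))) PySem.Dict.empty).items
      = (PySem.Set.ofList sF).map (fun k => (k, (sF.count k : Int))) := by
  have h := PySem.Dict.items_foldl_insert_fresh (l := PySem.Set.ofList sF)
      (k := fun a => a) (v := fun a => ((sF.count a : Int))) (d := PySem.Dict.empty)
      (by intro a _; simp [PySem.Dict.contains_empty])
      (by simpa using PySem.Set.nodup_ofList sF)
  simpa using h

-- B's even-positive test, as a function of the count
def pvEvenPos (c : Int) : Bool := decide (0 < c) && (PySem.Int.mod c 2 == 0)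

-- the removal test over the items list equals the even-positive test on the count
theorem pv_any_items (sF : List String) (f : String) :
    ((PySem.Set.ofList sF).map (fun k => (k, (sF.count k : Int)))).any
        (fun p => p.1 == f && (PySem.Int.mod p.2 2 == 0))
      = pvEvenPos ((sF.count f : Int)) := by
  rw [List.any_map]
  simp only [Function.comp_def]
  by_cases hf : f ∈ sF
  · have hf' : f ∈ PySem.Set.ofList sF := (PySem.Set.mem_ofList sF f).mpr hf
    have hpos : 0 < sF.count f := List.count_pos_iff.mpr hf
    by_cases he : PySem.Int.mod ((sF.count f : Int)) 2 == 0
    · have h1 : ((PySem.Set.ofList sF).any fun k => (k == f && (PySem.Int.mod ((sF.count k : Int)) 2 == 0))) = true := by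
        apply List.any_eq_true.mpr
        refine ⟨f, hf', ?_⟩
        simp only [beq_self_eq_true, Bool.true_and]
        exact he
      rw [h1]
      simp only [pvEvenPos, he, Bool.and_true, eq_comm]
      simpa using hpos
    · have he' : (PySem.Int.mod ((sF.count f : Int)) 2 == 0) = false := by simpa using he
      have h1 : ((PySem.Set.ofList sF).any fun k => (k == f && (PySem.Int.mod ((sF.count k : Int)) 2 == 0))) = false := by
        apply List.any_eq_false.mpr
        intro k hk
        by_cases hkf : k = f
        · subst hkf
          simp only [beq_self_eq_true, Bool.true_and, he']
          exact Bool.false_ne_true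
        · simp [hkf]
      rw [h1]
      simp only [pvEvenPos, he', Bool.and_false]
  · have hc : sF.count f = 0 := List.count_eq_zero.mpr hf
    have h1 : ((PySem.Set.ofList sF).any fun k => (k == f && (PySem.Int.mod ((sF.count k : Int)) 2 == 0))) = false := by
      apply List.any_eq_false.mpr
      intro k hk
      have hkf : k ≠ f := fun h => hf (h ▸ (PySem.Set.mem_ofList sF k).mp hk)
      simp [hkf]
    rw [h1]
    simp [pvEvenPos, hc]

-- B's two running tallies over the zip equal the counts in the two filtered flattenings
theorem pv_keep_fold (f : String) :
    ∀ (zs : List (Int × List String)) (c1 c0 : Int),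
    zs.foldl
        (fun (c : Int × Int) e =>
          let k : Int := e.2.count f
          if e.1 == 1 then (c.1 + k, c.2)
          else if e.1 == 0 then (c.1, c.2 + k)
          else c)
        (c1, c0)
      = (c1 + (((((zs.filter (fun e => e.1 == 1)).flatMap (fun e => e.2))).count f : Int)),
         c0 + (((((zs.filter (fun e => e.1 == 0)).flatMap (fun e => e.2))).count f : Int))) := by
  intro zs
  induction zs with
  | nil => intro c1 c0; simp
  | cons e zs ih =>
    intro c1 c0
    by_cases h1 : e.1 == 1
    · have h0 : (e.1 == 0) = false := by
        have : e.1 = 1 := by simpa using h1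
        simp [this]
      simp only [List.foldl_cons, h1, if_pos, List.filter_cons, h0, Bool.false_eq_true, if_false,
        List.flatMap_cons, List.count_append, ih]
      simp only [Prod.mk.injEq]
      constructor <;> push_cast <;> ring
    · by_cases h0 : e.1 == 0
      · simp only [List.foldl_cons, h1, Bool.false_eq_true, if_false, h0, if_pos,
          List.filter_cons, List.flatMap_cons, List.count_append, ih]
        simp only [Prod.mk.injEq]
        constructor <;> push_cast <;> ring
      · simp only [List.foldl_cons, h1, h0, Bool.false_eq_true, if_false, List.filter_cons, ih]

-- pvKeep in terms of the two counts
theorem pv_keep_eq (state_ip : List Int) (ip_FL : List (List String)) (f : String) :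
    pvKeep state_ip ip_FL f
      = (!(pvEvenPos (((((state_ip.zip ip_FL).filter (fun e => e.1 == 1)).flatMap (fun e => e.2)).count f : Int))) &&
         !(pvEvenPos (((((state_ip.zip ip_FL).filter (fun e => e.1 == 0)).flatMap (fun e => e.2)).count f : Int)))) := by
  unfold pvKeep
  rw [pv_keep_fold]
  rw [show ∀ x : Int, (0 : Int) + x = x from fun x => zero_add x,
      show ∀ x : Int, (0 : Int) + x = x from fun x => zero_add x]
  simp [pvEvenPos, Bool.not_or]

-- ===== VERDICT (by name: the statement is the Claim_ definition above) =====
theorem ded_xor_spec : Claim_equal_ded_xor := by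
  intro state_ip ip_FL op _ _
  unfold Spec_ded_xor
  cases ip_FL with
  | nil => rfl
  | cons fs rest =>
    simp only [ded_xor, ded_xor_alt]
    by_cases hc : PySem.Int.mod state_ip.sum 2 == 0
    · unfold pv_rm_f
      rw [pv_fc_items, pv_fc_items, pv_rm_eq_filter, pv_rm_eq_filter, List.filter_filter]
      apply List.filter_congr
      intro f _
      rw [pv_any_items, pv_any_items, pv_keep_eq, pv_enum_eq_zip 1, pv_enum_eq_zip 0]
      simp [Bool.and_comm]
    · unfold pv_rm_f
      rw [pv_fc_items, pv_fc_items, pv_rm_eq_filter, pv_rm_eq_filter, List.filter_filter]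
      apply List.filter_congr
      intro f _
      rw [pv_any_items, pv_any_items, pv_keep_eq, pv_enum_eq_zip 1, pv_enum_eq_zip 0]
      simp [Bool.and_comm]
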